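-- pv_equiv track=rewrite | github.com/KitchenGun/Hermes-Agent-Setting | discord_task_flow.py | parse_discord_command
-- ===== SOURCE A (Python) =====
-- COMMAND_PREFIXES = ("!task", "!run", "!agent")
--
-- def parse_discord_command(message: str) -> tuple[str, str]:
--     raw = str(message).strip()
--     lowered = raw.lower()
--
--     for prefix in COMMAND_PREFIXES:
--         if lowered == prefix:
--             return prefix, ""
--         if lowered.startswith(prefix + " "):
--             return prefix, raw[len(prefix) :].strip()
--
--     return "", ""
-- ===== SOURCE B (Python) =====
-- COMMAND_PREFIXES = ("!task", "!run", "!agent")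
-- _PREFIX_SET = frozenset(COMMAND_PREFIXES)
--
-- def parse_discord_command(message: str) -> tuple[str, str]:
--     raw = str(message).strip()
--     head, _, rest = raw.partition(' ')
--     head = head.lower()
--     if head in _PREFIX_SET:
--         return head, rest.strip()
--     return "", ""
-- ===== Notes on version B (the rewrite author's own statement) =====
-- stated objective: idiomatic
-- what changed: Instead of scanning each prefix with startswith over the lowered message, B splits the stripped message once at the first space (str.partition) and tests the lowercased head token with a single frozenset membership lookup.
import Mathlib
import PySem

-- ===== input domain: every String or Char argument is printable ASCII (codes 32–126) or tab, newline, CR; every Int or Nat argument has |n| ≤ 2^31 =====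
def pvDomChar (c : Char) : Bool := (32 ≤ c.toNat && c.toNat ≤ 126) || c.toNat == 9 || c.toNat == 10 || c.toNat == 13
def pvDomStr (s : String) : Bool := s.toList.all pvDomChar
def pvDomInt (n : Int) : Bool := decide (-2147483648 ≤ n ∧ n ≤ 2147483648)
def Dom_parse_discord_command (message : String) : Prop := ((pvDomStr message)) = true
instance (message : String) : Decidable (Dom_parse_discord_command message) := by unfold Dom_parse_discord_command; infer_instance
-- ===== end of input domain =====

-- B parses once: split the stripped message at the first space and test the lowercased
-- head token against a set of known prefixes, instead of A's per-prefix startswith scan.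


-- ===== PORT A =====
def pvCommandPrefixes : List String := ["!task", "!run", "!agent"]

def pvParseLoop (raw lowered : String) : List String → String × String
  | [] => ("", "")
  | p :: ps =>
    if lowered = p then (p, "")
    else if PySem.Str.startswith lowered (p ++ " ") then
      (p, PySem.Str.strip (PySem.Str.slice raw (some (PySem.Str.len p)) none))
    else pvParseLoop raw lowered ps

def parse_discord_command (message : String) : String × String :=
  let raw := PySem.Str.strip message
  let lowered := PySem.Str.lower raw
  pvParseLoop raw lowered pvCommandPrefixes

-- ===== PORT B =====
def pvPrefixSet : PySem.Set String := PySem.Set.ofList ["!task", "!run", "!agent"]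

-- hand port of raw.partition(' ') (exact: splits at the FIRST occurrence of the one-char separator)
def pvPartitionSpace (raw : String) : String × String :=
  let i := PySem.Str.find raw " "
  if i = -1 then (raw, "")
  else (PySem.Str.slice raw none (some i), PySem.Str.slice raw (some (i + 1)) none)

def parse_discord_command_alt (message : String) : String × String :=
  let raw := PySem.Str.strip message
  let hr := pvPartitionSpace raw
  let head := PySem.Str.lower hr.1
  if pvPrefixSet.contains head then (head, PySem.Str.strip hr.2) else ("", "")

-- ===== PRECONDITION & SPEC =====
def Spec_parse_discord_command (message : String) (out : String × String) : Prop := out = parse_discord_command_alt message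
instance (message : String) (out : String × String) : Decidable (Spec_parse_discord_command message out) := by unfold Spec_parse_discord_command; infer_instance

-- ===== CLAIM (what is proved, stated in full; the proofs are below) =====
def Claim_equal_parse_discord_command : Prop := ∀ (message : String), Dom_parse_discord_command message → Spec_parse_discord_command message (parse_discord_command message)

-- ===== LEMMAS AND PROOFS =====

theorem pvLowerChar_space_iff (c : Char) : PySem.Chars.lowerChar c = ' ' ↔ c = ' ' := by
  unfold PySem.Chars.lowerChar PySem.Chars.isupper
  split
  · rename_i hu
    simp only [Bool.and_eq_true, decide_eq_true_eq] at hu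
    obtain ⟨h1, h2⟩ := hu
    simp only [Char.le_def] at h1 h2
    rw [UInt32.le_iff_toNat_le] at h1
    have h1' : 65 ≤ c.toNat := h1
    constructor
    · intro h
      have h32 : (Char.ofNat (c.toNat + 32)).toNat = 32 := by rw [h]; rfl
      rw [Char.toNat_ofNat] at h32
      split at h32 <;> omega
    · intro h; subst h; exact absurd h1' (by decide)
  · simp

theorem pvSpace_mem_lower {L : List Char} : ' ' ∈ PySem.Chars.lower L ↔ ' ' ∈ L := by
  simp only [PySem.Chars.lower, List.mem_map]
  constructor
  · rintro ⟨c, hc, h⟩; rw [pvLowerChar_space_iff] at h; subst h; exact hc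
  · intro h; exact ⟨' ', h, by rfl⟩

theorem pvStartswith_false {L : List Char} (h : ' ' ∉ L) (p : List Char) :
    PySem.Chars.startswith (PySem.Chars.lower L) (p ++ [' ']) = false := by
  rw [Bool.eq_false_iff]
  intro hs
  rw [PySem.Chars.startswith_iff] at hs
  have : ' ' ∈ PySem.Chars.lower L := hs.subset (by simp)
  exact h (pvSpace_mem_lower.mp this)

theorem pvEq_false {L p : List Char} {k : Nat} (hk : k < L.length) (hsp : L[k] = ' ')
    (hp : ' ' ∉ p) : PySem.Chars.lower L ≠ p := by
  intro h
  apply hp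
  rw [← h]
  exact pvSpace_mem_lower.mpr (hsp ▸ List.getElem_mem hk)

theorem pvStrip_space_cons (xs : List Char) :
    PySem.Chars.strip (' ' :: xs) = PySem.Chars.strip xs := by
  have hsp : PySem.Chars.isspace ' ' = true := by decide
  simp [PySem.Chars.strip, PySem.Chars.lstrip, List.dropWhile, hsp]

theorem pvStart_iff {L p : List Char} {k : Nat} (hk : k < L.length) (hsp : L[k] = ' ')
    (hmin : ∀ j (hj : j < k), L[j]'(by omega) ≠ ' ') (hp : ' ' ∉ p) :
    PySem.Chars.startswith (PySem.Chars.lower L) (p ++ [' ']) = true ↔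
      PySem.Chars.lower (L.take k) = p := by
  rw [PySem.Chars.startswith_iff]
  unfold PySem.Chars.lower
  constructor
  · intro hpre
    rw [List.prefix_iff_eq_take] at hpre
    have hlen : p.length + 1 ≤ L.length := by
      have := congrArg List.length hpre
      simp at this
      omega
    have hget : ∀ j (hj : j ≤ p.length),
        PySem.Chars.lowerChar (L[j]'(by omega)) =
          (p ++ [' '])[j]'(by simp only [List.length_append, List.length_cons, List.length_nil]; omega) := by
      intro j hj
      have hjlt : j < (p ++ [' ']).length := by
        simp only [List.length_append, List.length_cons, List.length_nil]; omega
      have hjL : j < L.length := by omega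
      have h0 := congrArg (fun l => l[j]?) hpre
      simp only [List.getElem?_take, List.getElem?_map] at h0
      rw [if_pos hjlt, List.getElem?_eq_getElem hjlt, List.getElem?_eq_getElem hjL] at h0
      simp at h0
      exact h0.symm
    have hLm : L[p.length]'(by omega) = ' ' := by
      have := hget p.length le_rfl
      rw [List.getElem_append_right le_rfl] at this
      simp at this
      exact (pvLowerChar_space_iff _).mp this
    have hkm : k = p.length := by
      rcases Nat.lt_trichotomy k p.length with h | h | h
      · exfalso
        have := hget k (by omega)
        rw [List.getElem_append_left (by omega)] at this
        rw [hsp] at this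
        have h1 : (' ' : Char) = p[k]'(by omega) := by
          rw [← this]; exact ((pvLowerChar_space_iff ' ').mpr rfl).symm
        exact hp (h1 ▸ List.getElem_mem (by omega))
      · exact h
      · exact absurd hLm (hmin p.length h)
    have h2 := congrArg (List.take p.length) hpre
    rw [List.take_left' rfl] at h2
    have hmn : min p.length (p ++ [' ']).length = p.length := by
      simp only [List.length_append, List.length_cons, List.length_nil]; omega
    have h3 : p = List.take p.length (List.map PySem.Chars.lowerChar L) :=
      h2.trans (by rw [List.take_take, hmn])
    rw [hkm, List.map_take]
    exact h3.symm
  · intro hEq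
    have hmk : p.length = k := by
      have := congrArg List.length hEq
      simp at this
      omega
    have hkey : p ++ [' '] = (List.map PySem.Chars.lowerChar L).take (k + 1) := by
      rw [← List.map_take, List.take_add_one, List.getElem?_eq_getElem hk, hsp]
      unfold PySem.Chars.lower at hEq
      simp [hEq.symm]
      rfl
    rw [hkey]
    exact List.take_prefix _ _

theorem pvTail_eq (raw : String) {k : Nat} (hk : k < raw.toList.length) (hsp : raw.toList[k] = ' ') :
    PySem.Str.strip (PySem.Str.slice raw (some (k : Int)) none) =
      PySem.Str.strip (PySem.Str.slice raw (some ((k : Int) + 1)) none) := by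
  rw [← String.toList_inj]
  rw [PySem.Str.toList_strip, PySem.Str.toList_strip, PySem.Str.toList_slice, PySem.Str.toList_slice,
    PySem.Chars.slice_eq_listSlice, PySem.Chars.slice_eq_listSlice,
    PySem.List.slice_from _ (by omega : (0:Int) ≤ (k : Int)),
    PySem.List.slice_from _ (by omega : (0:Int) ≤ (k : Int) + 1)]
  have h1 : ((k : Int)).toNat = k := by omega
  have h2 : ((k : Int) + 1).toNat = k + 1 := by omega
  rw [h1, h2, List.drop_eq_getElem_cons hk, hsp, pvStrip_space_cons]

theorem pvCore_eq (raw : String) :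
    pvParseLoop raw (PySem.Str.lower raw) pvCommandPrefixes =
      (let hr := pvPartitionSpace raw
       let head := PySem.Str.lower hr.1
       if pvPrefixSet.contains head then (head, PySem.Str.strip hr.2) else ("", "")) := by
  have hfind : PySem.Str.find raw " " = PySem.Chars.find raw.toList [' '] := by
    rw [PySem.Str.find_eq]; rfl
  have hsetlit : pvPrefixSet = (["!task", "!run", "!agent"] : List String) := rfl
  by_cases hneg : PySem.Chars.find raw.toList [' '] = -1
  · -- no space in raw
    have hmem : ' ' ∉ raw.toList := by
      rw [PySem.Chars.find_eq_neg_one_iff] at hneg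
      simpa [List.singleton_infix_iff] using hneg
    have hsw : ∀ p : String, PySem.Str.startswith (PySem.Str.lower raw) (p ++ " ") = false := by
      intro p
      rw [PySem.Str.startswith_eq, PySem.Str.toList_lower,
        show (p ++ " ").toList = p.toList ++ [' '] by simp]
      exact pvStartswith_false hmem _
    simp only [pvPartitionSpace, hfind, hneg, pvParseLoop, pvCommandPrefixes, hsw,
      Bool.false_eq_true, if_false]
    by_cases h1 : PySem.Str.lower raw = "!task"
    · simp [h1, hsetlit]; rfl
    · by_cases h2 : PySem.Str.lower raw = "!run"
      · simp [h2, hsetlit]; rfl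
      · by_cases h3 : PySem.Str.lower raw = "!agent"
        · simp [h3, hsetlit]; rfl
        · simp [h1, h2, h3, PySem.Set.contains, hsetlit]
  · -- a space at index k
    have hge : 0 ≤ PySem.Chars.find raw.toList [' '] := by
      have := PySem.Chars.neg_one_le_find raw.toList [' ']
      omega
    obtain ⟨hpre, hmin0⟩ := PySem.Chars.find_spec hge
    set k : Nat := (PySem.Chars.find raw.toList [' ']).toNat with hkdef
    have hklen : PySem.Chars.find raw.toList [' '] ≤ raw.toList.length := PySem.Chars.find_le_length _ _
    have hk : k < raw.toList.length := by
      have hlen1 := hpre.length_le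
      rw [List.length_drop] at hlen1
      simp only [List.length_cons, List.length_nil] at hlen1
      omega
    have hsp : raw.toList[k] = ' ' := by
      obtain ⟨t, ht⟩ := hpre
      rw [List.drop_eq_getElem_cons hk] at ht
      exact (List.cons.injEq _ _ _ _ ▸ ht).1.symm
    have hmin : ∀ j (hj : j < k), raw.toList[j]'(by omega) ≠ ' ' := by
      intro j hj hcontra
      have hdj : List.drop j raw.toList = ' ' :: List.drop (j + 1) raw.toList := by
        rw [List.drop_eq_getElem_cons (show j < raw.toList.length by omega), hcontra]
      exact hmin0 j hj ⟨List.drop (j + 1) raw.toList, hdj.symm⟩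
    have hcast : PySem.Chars.find raw.toList [' '] = (k : Int) := by omega
    -- B's head as a list
    have hhead : ∀ p : String,
        (PySem.Str.lower (PySem.Str.slice raw none (some (k : Int))) = p) ↔
          PySem.Chars.lower (raw.toList.take k) = p.toList := by
      intro p
      rw [← String.toList_inj, PySem.Str.toList_lower, PySem.Str.toList_slice,
        PySem.Chars.slice_eq_listSlice, PySem.List.slice_to _ (by omega : (0:Int) ≤ (k : Int)),
        show ((k : Int)).toNat = k by omega]
    -- A's conditions as lists
    have heqF : ∀ p : String, ' ' ∉ p.toList → ¬ (PySem.Str.lower raw = p) := by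
      intro p hp h
      rw [← String.toList_inj, PySem.Str.toList_lower] at h
      exact pvEq_false hk hsp hp h
    have hswI : ∀ p : String, ' ' ∉ p.toList →
        (PySem.Str.startswith (PySem.Str.lower raw) (p ++ " ") = true ↔
          PySem.Chars.lower (raw.toList.take k) = p.toList) := by
      intro p hp
      rw [PySem.Str.startswith_eq, PySem.Str.toList_lower,
        show (p ++ " ").toList = p.toList ++ [' '] by simp]
      exact pvStart_iff hk hsp hmin hp
    have hlen5 : ∀ p : String, PySem.Chars.lower (raw.toList.take k) = p.toList → k = p.toList.length := by
      intro p h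
      have := congrArg List.length h
      simp only [PySem.Chars.lower, List.length_map, List.length_take] at this
      omega
    simp only [pvPartitionSpace, hfind, hcast, pvParseLoop, pvCommandPrefixes]
    have hkneg : ¬((k : Int) = -1) := by omega
    rw [if_neg hkneg]
    by_cases h1 : PySem.Chars.lower (raw.toList.take k) = "!task".toList
    · have hkn : k = 5 := hlen5 _ h1
      rw [if_neg (heqF "!task" (by decide)), if_pos ((hswI "!task" (by decide)).mpr h1)]
      rw [if_pos (by rw [PySem.Set.contains, hsetlit]; simp [(hhead "!task").mpr h1])]
      refine Prod.ext ?_ ?_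
      · exact ((hhead "!task").mpr h1).symm
      · show PySem.Str.strip (PySem.Str.slice raw (some (PySem.Str.len "!task")) none) =
          PySem.Str.strip (PySem.Str.slice raw (some ((k : Int) + 1)) none)
        rw [show PySem.Str.len "!task" = ((5:Nat) : Int) by rfl, ← hkn]
        exact pvTail_eq raw hk hsp
    · by_cases h2 : PySem.Chars.lower (raw.toList.take k) = "!run".toList
      · have hkn : k = 4 := hlen5 _ h2
        rw [if_neg (heqF "!task" (by decide)), if_neg ((hswI "!task" (by decide)).not.mpr h1), if_neg (heqF "!run" (by decide)), if_pos ((hswI "!run" (by decide)).mpr h2)]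
        rw [if_pos (by rw [PySem.Set.contains, hsetlit]; simp [(hhead "!run").mpr h2])]
        refine Prod.ext ?_ ?_
        · exact ((hhead "!run").mpr h2).symm
        · show PySem.Str.strip (PySem.Str.slice raw (some (PySem.Str.len "!run")) none) =
            PySem.Str.strip (PySem.Str.slice raw (some ((k : Int) + 1)) none)
          rw [show PySem.Str.len "!run" = ((4:Nat) : Int) by rfl, ← hkn]
          exact pvTail_eq raw hk hsp
      · by_cases h3 : PySem.Chars.lower (raw.toList.take k) = "!agent".toList
        · have hkn : k = 6 := hlen5 _ h3
          rw [if_neg (heqF "!task" (by decide)), if_neg ((hswI "!task" (by decide)).not.mpr h1), if_neg (heqF "!run" (by decide)), if_neg ((hswI "!run" (by decide)).not.mpr h2), if_neg (heqF "!agent" (by decide)), if_pos ((hswI "!agent" (by decide)).mpr h3)]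
          rw [if_pos (by rw [PySem.Set.contains, hsetlit]; simp [(hhead "!agent").mpr h3])]
          refine Prod.ext ?_ ?_
          · exact ((hhead "!agent").mpr h3).symm
          · show PySem.Str.strip (PySem.Str.slice raw (some (PySem.Str.len "!agent")) none) =
              PySem.Str.strip (PySem.Str.slice raw (some ((k : Int) + 1)) none)
            rw [show PySem.Str.len "!agent" = ((6:Nat) : Int) by rfl, ← hkn]
            exact pvTail_eq raw hk hsp
        · rw [if_neg (heqF "!task" (by decide)), if_neg ((hswI "!task" (by decide)).not.mpr h1), if_neg (heqF "!run" (by decide)), if_neg ((hswI "!run" (by decide)).not.mpr h2), if_neg (heqF "!agent" (by decide)), if_neg ((hswI "!agent" (by decide)).not.mpr h3)]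
          rw [if_neg (by
            rw [PySem.Set.contains, hsetlit]
            simp only [List.contains_eq_mem, List.mem_cons, List.not_mem_nil, or_false,
              decide_eq_true_eq]
            push Not
            exact ⟨fun h => h1 ((hhead "!task").mp h), fun h => h2 ((hhead "!run").mp h),
              fun h => h3 ((hhead "!agent").mp h)⟩)]

-- ===== VERDICT (by name: the statement is the Claim_ definition above) =====
theorem parse_discord_command_spec : Claim_equal_parse_discord_command := by
  intro message _
  unfold Spec_parse_discord_command parse_discord_command parse_discord_command_alt
  exact pvCore_eq (PySem.Str.strip message)
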